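-- pv_equiv track=rewrite | github.com/bc2026/ArgonneSummer2025 | RemovingOutlierDatapoints/gui/backend.py | get_detected_intervals_notebook
-- ===== SOURCE A (Python) =====
-- def get_detected_intervals_notebook(shifts_index_list, first_region):
--     """Get detected intervals exactly as in notebook - ensuring continuity"""
--     result = [first_region]
--
--     # Ensure continuity by making sure regions connect properly
--     if len(shifts_index_list) >= 1:
--         # Create a region from first_region end to first shift (eliminates gap)
--         result.append((first_region[1], shifts_index_list[0]))
--
--         # Then create regions between consecutive shifts
--         for i in range(0, len(shifts_index_list) - 1):
--             start_p = shifts_index_list[i]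
--             next_p = shifts_index_list[i + 1]
--             result.append((start_p, next_p))
--
--     return result
-- ===== SOURCE B (Python) =====
-- def get_detected_intervals_notebook(shifts_index_list, first_region):
--     """Build the interval list back-to-front: traverse the shifts in reverse,
--     carrying the upper boundary of the current interval, then reverse once."""
--     acc = []
--     upper = None
--     for b in reversed(shifts_index_list):
--         if upper is not None:
--             acc.append((b, upper))
--         upper = b
--     if upper is not None:
--         acc.append((first_region[1], upper))
--     acc.append(first_region)
--     acc.reverse()
--     return acc
-- ===== Notes on version B (the rewrite author's own statement) =====
-- stated objective: alternative
-- what changed: B builds the interval list back-to-front: a single reverse traversal of the shifts carrying the current upper boundary, with one final reverse, instead of A's special-cased connecting interval plus forward indexed pair loop.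
import Mathlib
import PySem

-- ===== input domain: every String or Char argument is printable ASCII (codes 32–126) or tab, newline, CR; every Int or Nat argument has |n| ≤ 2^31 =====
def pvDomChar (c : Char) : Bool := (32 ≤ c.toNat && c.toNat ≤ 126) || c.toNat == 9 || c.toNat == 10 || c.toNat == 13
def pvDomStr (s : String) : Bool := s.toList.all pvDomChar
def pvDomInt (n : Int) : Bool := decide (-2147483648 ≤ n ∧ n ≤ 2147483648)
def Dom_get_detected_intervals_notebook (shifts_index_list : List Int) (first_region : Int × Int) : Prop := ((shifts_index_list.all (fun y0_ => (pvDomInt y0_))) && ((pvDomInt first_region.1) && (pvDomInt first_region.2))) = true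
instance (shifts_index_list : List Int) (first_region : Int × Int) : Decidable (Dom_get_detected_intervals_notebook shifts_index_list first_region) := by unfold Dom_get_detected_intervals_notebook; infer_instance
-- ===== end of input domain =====

-- B builds the interval list back-to-front (reverse traversal carrying the upper
-- boundary, one final reverse) instead of A's special-cased connecting interval
-- plus forward indexed pair loop (alternative, same cost).

-- ===== PORT A =====
def get_detected_intervals_notebook (shifts_index_list : List Int) (first_region : Int × Int) : List (Int × Int) :=
  let result : List (Int × Int) := [first_region]
  if shifts_index_list.length ≥ 1 then
    let result := result ++ [(first_region.2, (PySem.List.pyGet? shifts_index_list 0).getD 0)]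
    (List.range (shifts_index_list.length - 1)).foldl (fun acc (i : Nat) =>
      let start_p := (PySem.List.pyGet? shifts_index_list (i : Int)).getD 0
      let next_p := (PySem.List.pyGet? shifts_index_list ((i : Int) + 1)).getD 0
      acc ++ [(start_p, next_p)]) result
  else result

-- ===== PORT B =====
-- loop body of Source B: state = (acc, upper); append (b, upper) when upper is set, then upper := b
def pvAltStep (st : List (Int × Int) × Option Int) (b : Int) : List (Int × Int) × Option Int :=
  match st.2 with
  | some u => (st.1 ++ [(b, u)], some b)
  | none => (st.1, some b)

def get_detected_intervals_notebook_alt (shifts_index_list : List Int) (first_region : Int × Int) : List (Int × Int) :=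
  let st := shifts_index_list.reverse.foldl pvAltStep ([], none)
  let acc := match st.2 with
    | some u => st.1 ++ [(first_region.2, u)]
    | none => st.1
  (acc ++ [first_region]).reverse

-- ===== PRECONDITION & SPEC =====
def Spec_get_detected_intervals_notebook (shifts_index_list : List Int) (first_region : Int × Int) (out : List (Int × Int)) : Prop := out = get_detected_intervals_notebook_alt shifts_index_list first_region
instance (shifts_index_list : List Int) (first_region : Int × Int) (out : List (Int × Int)) : Decidable (Spec_get_detected_intervals_notebook shifts_index_list first_region out) := by unfold Spec_get_detected_intervals_notebook; infer_instance

-- ===== CLAIM (what is proved, stated in full; the proofs are below) =====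
def Claim_equal_get_detected_intervals_notebook : Prop := ∀ (shifts_index_list : List Int) (first_region : Int × Int), Dom_get_detected_intervals_notebook shifts_index_list first_region → Spec_get_detected_intervals_notebook shifts_index_list first_region (get_detected_intervals_notebook shifts_index_list first_region)

-- ===== LEMMAS AND PROOFS =====

-- B's reverse-traversal fold accumulates the adjacent pairs of s in reverse,
-- and carries s.head? as the pending upper boundary.
lemma pvAltStep_foldl_reverse (s : List Int) :
    s.reverse.foldl pvAltStep ([], none) = ((s.zip s.tail).reverse, s.head?) := by
  induction s with
  | nil => rfl
  | cons x xs ih =>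
    rw [List.reverse_cons, List.foldl_append, ih]
    cases xs with
    | nil => rfl
    | cons y ys => simp [pvAltStep]

-- hence B's result is first_region followed by the adjacent pairs of fr.2 :: s
lemma alt_eq_cons_zip (s : List Int) (fr : Int × Int) :
    get_detected_intervals_notebook_alt s fr = fr :: (fr.2 :: s).zip s := by
  unfold get_detected_intervals_notebook_alt
  rw [pvAltStep_foldl_reverse]
  cases s with
  | nil => rfl
  | cons x xs => simp

-- A's indexed pair loop produces exactly the adjacent pairs s.zip s.tail.
lemma range_map_pairs_eq_zip_tail (s : List Int) :
    (List.range (s.length - 1)).map (fun (i : Nat) =>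
      ((PySem.List.pyGet? s (i : Int)).getD 0, (PySem.List.pyGet? s ((i : Int) + 1)).getD 0))
      = s.zip s.tail := by
  apply List.ext_getElem
  · simp only [List.length_map, List.length_range, List.length_zip, List.length_tail]
    omega
  · intro i h1 h2
    have hi : i < s.length - 1 := by simpa using h1
    have hcast : ((i : Int) + 1) = ((i + 1 : Nat) : Int) := by push_cast; ring
    simp only [List.getElem_map, List.getElem_range, List.getElem_zip, hcast,
      PySem.List.pyGet?_natCast]
    have h1' : i < s.length := by omega
    have h2' : i + 1 < s.length := by omega
    have ht : i < s.tail.length := by simp [List.length_tail]; omega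
    simp [h1', h2', List.getElem_tail]

-- ===== VERDICT (by name: the statement is the Claim_ definition above) =====
theorem get_detected_intervals_notebook_spec : Claim_equal_get_detected_intervals_notebook := by
  intro s fr _
  unfold Spec_get_detected_intervals_notebook
  rw [alt_eq_cons_zip]
  unfold get_detected_intervals_notebook
  cases s with
  | nil => rfl
  | cons x xs =>
    simp only [List.length_cons, ge_iff_le, Nat.le_add_left, if_pos, List.zip_cons_cons]
    rw [PySem.List.foldl_append_singleton_eq_map]
    have h := range_map_pairs_eq_zip_tail (x :: xs)
    simp only [List.length_cons, Nat.add_sub_cancel, List.tail_cons] at h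
    rw [Nat.add_sub_cancel, h]
    simp [PySem.List.pyGet?, PySem.List.pyIdx?]
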